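-- pv_equiv track=rewrite | github.com/SheCodeBugg/Vedic-Sky-View | predictive_astrology/dasha_predictions.py | check_aspect
-- ===== SOURCE A (Python) =====
-- VEDIC_DRISHTI = {
--     'Sun': [7],
--     'Moon': [7],
--     'Mars': [4, 7, 8],
--     'Mercury': [7],
--     'Jupiter': [5, 7, 9],
--     'Venus': [7],
--     'Saturn': [3, 7, 10],
--     'Rahu': [5, 9],
--     'Ketu': [5, 9]
-- }
--
-- def check_aspect(transit_planet_house, natal_planet_house, planet_name):
--     """Check if transit planet aspects natal planet."""
--     if planet_name not in VEDIC_DRISHTI: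
--         return False
--
--     aspects = VEDIC_DRISHTI[planet_name]
--     for aspect in aspects:
--         aspected_house = ((transit_planet_house - 1 + aspect) % 12) + 1
--         if aspected_house == natal_planet_house:
--             return True
--     return False
-- ===== SOURCE B (Python) =====
-- VEDIC_DRISHTI = {
--     'Sun': [7],
--     'Moon': [7],
--     'Mars': [4, 7, 8],
--     'Mercury': [7],
--     'Jupiter': [5, 7, 9],
--     'Venus': [7],
--     'Saturn': [3, 7, 10],
--     'Rahu': [5, 9],
--     'Ketu': [5, 9]
-- }
--
-- # Inverted index, built once at module load: for each aspect offset (mod 12),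
-- # the set of planets that cast an aspect at that offset.
-- OFFSET_PLANETS = {}
-- for _planet, _aspects in VEDIC_DRISHTI.items():
--     for _a in _aspects:
--         OFFSET_PLANETS.setdefault(_a % 12, set()).add(_planet)
--
-- def check_aspect(transit_planet_house, natal_planet_house, planet_name):
--     """Check if transit planet aspects natal planet (lookup by offset in an inverted index)."""
--     if not 1 <= natal_planet_house <= 12:
--         return False
--     planets = OFFSET_PLANETS.get((natal_planet_house - transit_planet_house) % 12)
--     return planets is not None and planet_name in planets
-- ===== Notes on version B (the rewrite author's own statement) =====
-- stated objective: alternative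
-- what changed: B precomputes an inverted index mapping each aspect offset (mod 12) to the set of planets that aspect at that offset, then answers a query with one offset computation (natal - transit) % 12, one dict lookup keyed by the offset, and a planet-name membership test - the per-call loop over the planet's aspect list disappears and the data is organized offset-first instead of planet-first.
import Mathlib
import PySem

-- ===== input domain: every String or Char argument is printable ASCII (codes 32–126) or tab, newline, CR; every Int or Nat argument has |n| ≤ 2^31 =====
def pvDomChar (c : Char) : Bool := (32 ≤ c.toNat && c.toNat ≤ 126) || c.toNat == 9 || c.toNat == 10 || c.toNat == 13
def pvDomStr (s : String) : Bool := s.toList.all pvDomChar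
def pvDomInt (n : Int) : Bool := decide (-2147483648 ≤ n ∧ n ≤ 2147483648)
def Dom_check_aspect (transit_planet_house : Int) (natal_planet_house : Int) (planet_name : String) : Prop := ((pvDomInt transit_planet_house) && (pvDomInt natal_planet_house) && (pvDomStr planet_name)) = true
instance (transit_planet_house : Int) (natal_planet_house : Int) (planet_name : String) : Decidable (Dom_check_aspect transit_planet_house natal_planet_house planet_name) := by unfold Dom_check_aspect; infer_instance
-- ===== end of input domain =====

-- B replaces A's per-call loop over the planet's aspect list by an inverted index built once
-- (offset mod 12 → set of planets aspecting at that offset) and one lookup keyed by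
-- (natal − transit) mod 12 (objective: alternative).

-- ===== PORT A =====
def vedicDrishti : PySem.Dict String (List Int) := PySem.Dict.ofList
  [("Sun", [7]), ("Moon", [7]), ("Mars", [4, 7, 8]), ("Mercury", [7]),
   ("Jupiter", [5, 7, 9]), ("Venus", [7]), ("Saturn", [3, 7, 10]),
   ("Rahu", [5, 9]), ("Ketu", [5, 9])]

-- the 'for aspect in aspects: … return True … / return False' loop of A
def aspectLoop (t n : Int) : List Int → Bool
  | [] => false
  | a :: rest =>
      if PySem.Int.mod (t - 1 + a) 12 + 1 == n then true else aspectLoop t n rest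

def check_aspect (transit_planet_house : Int) (natal_planet_house : Int) (planet_name : String) : Bool :=
  if !(vedicDrishti.contains planet_name) then false
  else
    match vedicDrishti.get? planet_name with
    | none => false   -- unreachable: the key is present
    | some aspects => aspectLoop transit_planet_house natal_planet_house aspects

-- ===== PORT B =====
-- the module-level double loop building OFFSET_PLANETS (setdefault(k, set()).add(p) = modify k ∅ (·.add p))
def offsetPlanets : PySem.Dict Int (PySem.Set String) :=
  vedicDrishti.items.foldl
    (fun d pa =>
      pa.2.foldl
        (fun d a => d.modify (PySem.Int.mod a 12) PySem.Set.empty (fun s => PySem.Set.add s pa.1))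
        d)
    PySem.Dict.empty

def check_aspect_alt (transit_planet_house : Int) (natal_planet_house : Int) (planet_name : String) : Bool :=
  if !(decide (1 ≤ natal_planet_house ∧ natal_planet_house ≤ 12)) then false
  else
    match offsetPlanets.get? (PySem.Int.mod (natal_planet_house - transit_planet_house) 12) with
    | none => false                                   -- planets is None
    | some planets => PySem.Set.contains planets planet_name

-- ===== PRECONDITION & SPEC =====
def Spec_check_aspect (transit_planet_house : Int) (natal_planet_house : Int) (planet_name : String) (out : Bool) : Prop := out = check_aspect_alt transit_planet_house natal_planet_house planet_name
instance (transit_planet_house : Int) (natal_planet_house : Int) (planet_name : String) (out : Bool) : Decidable (Spec_check_aspect transit_planet_house natal_planet_house planet_name out) := by unfold Spec_check_aspect; infer_instance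

-- ===== CLAIM (what is proved, stated in full; the proofs are below) =====
def Claim_equal_check_aspect : Prop := ∀ (transit_planet_house : Int) (natal_planet_house : Int) (planet_name : String), Dom_check_aspect transit_planet_house natal_planet_house planet_name → Spec_check_aspect transit_planet_house natal_planet_house planet_name (check_aspect transit_planet_house natal_planet_house planet_name)

-- ===== LEMMAS AND PROOFS =====

-- the inverted index as a literal (kernel evaluation of the building fold)
lemma offsetPlanets_eq :
    offsetPlanets = PySem.Dict.mk
      [(7, ["Sun", "Moon", "Mars", "Mercury", "Jupiter", "Venus", "Saturn"]),
       (4, ["Mars"]), (8, ["Mars"]),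
       (5, ["Jupiter", "Rahu", "Ketu"]), (9, ["Jupiter", "Rahu", "Ketu"]),
       (3, ["Saturn"]), (10, ["Saturn"])] := by decide

-- if the natal house is not a real house 1..12, A's loop never fires
lemma aspectLoop_false_of_not_range (t n : Int) (hn : ¬ (1 ≤ n ∧ n ≤ 12)) (L : List Int) :
    aspectLoop t n L = false := by
  induction L with
  | nil => rfl
  | cons a rest ih =>
      simp [aspectLoop, ih]
      omega

-- with 1 ≤ n ≤ 12, A's hit test for offset a is the offset equation mod 12
lemma hit_eq (t n : Int) (hn : 1 ≤ n ∧ n ≤ 12) (a : Int) :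
    (PySem.Int.mod (t - 1 + a) 12 + 1 == n) = (PySem.Int.mod (n - t) 12 == PySem.Int.mod a 12) := by
  have h12 : (0:Int) < 12 := by omega
  rw [PySem.Int.mod_eq_emod_of_pos h12, PySem.Int.mod_eq_emod_of_pos h12,
      PySem.Int.mod_eq_emod_of_pos h12]
  rw [Bool.eq_iff_iff]
  simp only [beq_iff_eq]
  omega

-- ===== VERDICT (by name: the statement is the Claim_ definition above) =====
theorem check_aspect_spec : Claim_equal_check_aspect := by
  intro t n name _
  unfold Spec_check_aspect
  by_cases hn : 1 ≤ n ∧ n ≤ 12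
  case neg =>
    -- B is false outright; A's loop can never hit a house outside 1..12
    unfold check_aspect check_aspect_alt
    simp only [hn, decide_false, Bool.not_false, if_true]
    cases hg : vedicDrishti.get? name with
    | none => simp
    | some L => simp [aspectLoop_false_of_not_range t n hn L]
  case pos =>
    by_cases hq1 : name = "Sun"
    case pos =>
      subst hq1
      simp only [check_aspect, check_aspect_alt,
        show vedicDrishti.contains "Sun" = true from by decide,
        show vedicDrishti.get? "Sun" = some [7] from by decide,
        Bool.not_true, Bool.false_eq_true, if_false, hn, and_self, decide_true,
        aspectLoop, hit_eq t n hn, offsetPlanets_eq, PySem.Dict.get?_mk_cons]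
      rw [PySem.Int.mod_eq_emod_of_pos (show (0:Int) < 12 by omega)]
      have hb : 0 ≤ (n - t) % 12 ∧ (n - t) % 12 < 12 :=
        ⟨Int.emod_nonneg _ (by omega), Int.emod_lt_of_pos _ (by omega)⟩
      generalize (n - t) % 12 = m at *
      obtain ⟨hm0, hm1⟩ := hb
      interval_cases m <;> decide
    case neg =>
    by_cases hq2 : name = "Moon"
    case pos =>
      subst hq2
      simp only [check_aspect, check_aspect_alt,
        show vedicDrishti.contains "Moon" = true from by decide,
        show vedicDrishti.get? "Moon" = some [7] from by decide,
        Bool.not_true, Bool.false_eq_true, if_false, hn, and_self, decide_true,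
        aspectLoop, hit_eq t n hn, offsetPlanets_eq, PySem.Dict.get?_mk_cons]
      rw [PySem.Int.mod_eq_emod_of_pos (show (0:Int) < 12 by omega)]
      have hb : 0 ≤ (n - t) % 12 ∧ (n - t) % 12 < 12 :=
        ⟨Int.emod_nonneg _ (by omega), Int.emod_lt_of_pos _ (by omega)⟩
      generalize (n - t) % 12 = m at *
      obtain ⟨hm0, hm1⟩ := hb
      interval_cases m <;> decide
    case neg =>
    by_cases hq3 : name = "Mars"
    case pos =>
      subst hq3
      simp only [check_aspect, check_aspect_alt,
        show vedicDrishti.contains "Mars" = true from by decide,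
        show vedicDrishti.get? "Mars" = some [4, 7, 8] from by decide,
        Bool.not_true, Bool.false_eq_true, if_false, hn, and_self, decide_true,
        aspectLoop, hit_eq t n hn, offsetPlanets_eq, PySem.Dict.get?_mk_cons]
      rw [PySem.Int.mod_eq_emod_of_pos (show (0:Int) < 12 by omega)]
      have hb : 0 ≤ (n - t) % 12 ∧ (n - t) % 12 < 12 :=
        ⟨Int.emod_nonneg _ (by omega), Int.emod_lt_of_pos _ (by omega)⟩
      generalize (n - t) % 12 = m at *
      obtain ⟨hm0, hm1⟩ := hb
      interval_cases m <;> decide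
    case neg =>
    by_cases hq4 : name = "Mercury"
    case pos =>
      subst hq4
      simp only [check_aspect, check_aspect_alt,
        show vedicDrishti.contains "Mercury" = true from by decide,
        show vedicDrishti.get? "Mercury" = some [7] from by decide,
        Bool.not_true, Bool.false_eq_true, if_false, hn, and_self, decide_true,
        aspectLoop, hit_eq t n hn, offsetPlanets_eq, PySem.Dict.get?_mk_cons]
      rw [PySem.Int.mod_eq_emod_of_pos (show (0:Int) < 12 by omega)]
      have hb : 0 ≤ (n - t) % 12 ∧ (n - t) % 12 < 12 :=
        ⟨Int.emod_nonneg _ (by omega), Int.emod_lt_of_pos _ (by omega)⟩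
      generalize (n - t) % 12 = m at *
      obtain ⟨hm0, hm1⟩ := hb
      interval_cases m <;> decide
    case neg =>
    by_cases hq5 : name = "Jupiter"
    case pos =>
      subst hq5
      simp only [check_aspect, check_aspect_alt,
        show vedicDrishti.contains "Jupiter" = true from by decide,
        show vedicDrishti.get? "Jupiter" = some [5, 7, 9] from by decide,
        Bool.not_true, Bool.false_eq_true, if_false, hn, and_self, decide_true,
        aspectLoop, hit_eq t n hn, offsetPlanets_eq, PySem.Dict.get?_mk_cons]
      rw [PySem.Int.mod_eq_emod_of_pos (show (0:Int) < 12 by omega)]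
      have hb : 0 ≤ (n - t) % 12 ∧ (n - t) % 12 < 12 :=
        ⟨Int.emod_nonneg _ (by omega), Int.emod_lt_of_pos _ (by omega)⟩
      generalize (n - t) % 12 = m at *
      obtain ⟨hm0, hm1⟩ := hb
      interval_cases m <;> decide
    case neg =>
    by_cases hq6 : name = "Venus"
    case pos =>
      subst hq6
      simp only [check_aspect, check_aspect_alt,
        show vedicDrishti.contains "Venus" = true from by decide,
        show vedicDrishti.get? "Venus" = some [7] from by decide,
        Bool.not_true, Bool.false_eq_true, if_false, hn, and_self, decide_true,
        aspectLoop, hit_eq t n hn, offsetPlanets_eq, PySem.Dict.get?_mk_cons]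
      rw [PySem.Int.mod_eq_emod_of_pos (show (0:Int) < 12 by omega)]
      have hb : 0 ≤ (n - t) % 12 ∧ (n - t) % 12 < 12 :=
        ⟨Int.emod_nonneg _ (by omega), Int.emod_lt_of_pos _ (by omega)⟩
      generalize (n - t) % 12 = m at *
      obtain ⟨hm0, hm1⟩ := hb
      interval_cases m <;> decide
    case neg =>
    by_cases hq7 : name = "Saturn"
    case pos =>
      subst hq7
      simp only [check_aspect, check_aspect_alt,
        show vedicDrishti.contains "Saturn" = true from by decide,
        show vedicDrishti.get? "Saturn" = some [3, 7, 10] from by decide,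
        Bool.not_true, Bool.false_eq_true, if_false, hn, and_self, decide_true,
        aspectLoop, hit_eq t n hn, offsetPlanets_eq, PySem.Dict.get?_mk_cons]
      rw [PySem.Int.mod_eq_emod_of_pos (show (0:Int) < 12 by omega)]
      have hb : 0 ≤ (n - t) % 12 ∧ (n - t) % 12 < 12 :=
        ⟨Int.emod_nonneg _ (by omega), Int.emod_lt_of_pos _ (by omega)⟩
      generalize (n - t) % 12 = m at *
      obtain ⟨hm0, hm1⟩ := hb
      interval_cases m <;> decide
    case neg =>
    by_cases hq8 : name = "Rahu"
    case pos =>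
      subst hq8
      simp only [check_aspect, check_aspect_alt,
        show vedicDrishti.contains "Rahu" = true from by decide,
        show vedicDrishti.get? "Rahu" = some [5, 9] from by decide,
        Bool.not_true, Bool.false_eq_true, if_false, hn, and_self, decide_true,
        aspectLoop, hit_eq t n hn, offsetPlanets_eq, PySem.Dict.get?_mk_cons]
      rw [PySem.Int.mod_eq_emod_of_pos (show (0:Int) < 12 by omega)]
      have hb : 0 ≤ (n - t) % 12 ∧ (n - t) % 12 < 12 :=
        ⟨Int.emod_nonneg _ (by omega), Int.emod_lt_of_pos _ (by omega)⟩
      generalize (n - t) % 12 = m at *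
      obtain ⟨hm0, hm1⟩ := hb
      interval_cases m <;> decide
    case neg =>
    by_cases hq9 : name = "Ketu"
    case pos =>
      subst hq9
      simp only [check_aspect, check_aspect_alt,
        show vedicDrishti.contains "Ketu" = true from by decide,
        show vedicDrishti.get? "Ketu" = some [5, 9] from by decide,
        Bool.not_true, Bool.false_eq_true, if_false, hn, and_self, decide_true,
        aspectLoop, hit_eq t n hn, offsetPlanets_eq, PySem.Dict.get?_mk_cons]
      rw [PySem.Int.mod_eq_emod_of_pos (show (0:Int) < 12 by omega)]
      have hb : 0 ≤ (n - t) % 12 ∧ (n - t) % 12 < 12 :=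
        ⟨Int.emod_nonneg _ (by omega), Int.emod_lt_of_pos _ (by omega)⟩
      generalize (n - t) % 12 = m at *
      obtain ⟨hm0, hm1⟩ := hb
      interval_cases m <;> decide
    case neg =>
    -- name is none of the nine planets: both sides are false
    have hvd : vedicDrishti = PySem.Dict.mk
        [("Sun", [7]), ("Moon", [7]), ("Mars", [4, 7, 8]), ("Mercury", [7]),
         ("Jupiter", [5, 7, 9]), ("Venus", [7]), ("Saturn", [3, 7, 10]),
         ("Rahu", [5, 9]), ("Ketu", [5, 9])] := by decide
    have hc : vedicDrishti.contains name = false := by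
      rw [hvd]
      simp [Ne.symm hq1, Ne.symm hq2, Ne.symm hq3, Ne.symm hq4, Ne.symm hq5, Ne.symm hq6,
        Ne.symm hq7, Ne.symm hq8, Ne.symm hq9]
    simp only [check_aspect, check_aspect_alt, hc, Bool.not_false, if_true, hn, and_self,
      decide_true, Bool.not_true, Bool.false_eq_true, if_false, offsetPlanets_eq,
      PySem.Dict.get?_mk_cons]
    split_ifs <;>
      simp [PySem.Set.contains, PySem.Dict.get?, hq1, hq2, hq3, hq4, hq5, hq6, hq7, hq8, hq9]
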